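-- pv_equiv track=rewrite | github.com/ivan-paz/fuzzy_cores | commit_cores.py | expand_rule
-- ===== SOURCE A (Python) =====
-- import itertools
-- import copy
--
-- def expand_rule(rule):
--     rule = copy.deepcopy(rule)
--     expanded_rule = []
--     for i in range(len(rule)):
--         rule[i] = rule[i]
--     for i in itertools.product(*rule):
--         expanded_rule.append(i)
--     return expanded_rule
-- ===== SOURCE B (Python) =====
-- def expand_rule(rule):
--     sizes = [len(s) for s in rule]
--     total = 1
--     for n in sizes:
--         total *= n
--     out = []
--     for i in range(total):
--         tup = [None] * len(rule)
--         rem = i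
--         for j in range(len(rule) - 1, -1, -1):
--             rem, d = divmod(rem, sizes[j])
--             tup[j] = rule[j][d]
--         out.append(tuple(tup))
--     return out
-- ===== Notes on version B (the rewrite author's own statement) =====
-- stated objective: alternative
-- what changed: Replaces itertools.product (recursive/accumulated tuple building) with mixed-radix index decoding: the k-th output tuple is computed directly from k by repeated divmod over the component sizes.
import Mathlib
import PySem

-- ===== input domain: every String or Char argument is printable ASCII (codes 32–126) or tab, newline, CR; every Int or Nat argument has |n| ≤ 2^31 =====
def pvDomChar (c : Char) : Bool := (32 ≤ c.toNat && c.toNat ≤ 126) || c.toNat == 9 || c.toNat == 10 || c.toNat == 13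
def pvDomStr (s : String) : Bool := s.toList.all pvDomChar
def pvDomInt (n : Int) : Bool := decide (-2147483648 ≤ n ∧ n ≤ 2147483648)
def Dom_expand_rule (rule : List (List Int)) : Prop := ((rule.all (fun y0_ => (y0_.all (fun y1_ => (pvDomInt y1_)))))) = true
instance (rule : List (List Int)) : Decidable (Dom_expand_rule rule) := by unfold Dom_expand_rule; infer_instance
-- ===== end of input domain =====

-- B replaces itertools.product with mixed-radix index decoding: output tuple k is
-- computed from the index k by repeated divmod over the component sizes (objective: alternative).

-- ===== PORT A =====
-- itertools.product(*rule), ported step for step as the standard recursive product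
-- (rightmost component varies fastest), producing tuples as lists.
def pvProduct (rule : List (List Int)) : List (List Int) :=
  match rule with
  | [] => [[]]
  | xs :: rest => xs.flatMap (fun x => (pvProduct rest).map (fun t => x :: t))

-- A: deepcopy and the self-assignment loop leave rule unchanged; then append each
-- element of itertools.product(*rule).
def expand_rule (rule : List (List Int)) : List (List Int) :=
  (pvProduct rule).foldl (fun acc i => acc ++ [i]) []

-- ===== PORT B =====
-- the inner descending j-loop of Source B: build the tuple right-to-left, each step
-- rem, d = divmod(rem, len(rule[j])); tup[j] = rule[j][d].  The index d is in range
-- whenever this is reached (i < total), so rule[j][d] is ported as getD (exact there).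
def pvDecode (rule : List (List Int)) (rem : Nat) : Nat × List Int :=
  match rule with
  | [] => (rem, [])
  | xs :: rest =>
      let (rem1, tl) := pvDecode rest rem
      (rem1 / xs.length, xs.getD (rem1 % xs.length) 0 :: tl)

def expand_rule_alt (rule : List (List Int)) : List (List Int) :=
  let sizes := rule.map List.length
  let total := sizes.foldl (· * ·) 1
  (List.range total).map (fun i => (pvDecode rule i).2)

-- ===== PRECONDITION & SPEC =====
def Spec_expand_rule (rule : List (List Int)) (out : List (List Int)) : Prop := out = expand_rule_alt rule
instance (rule : List (List Int)) (out : List (List Int)) : Decidable (Spec_expand_rule rule out) := by unfold Spec_expand_rule; infer_instance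

-- ===== CLAIM (what is proved, stated in full; the proofs are below) =====
def Claim_equal_expand_rule : Prop := ∀ (rule : List (List Int)), Dom_expand_rule rule → Spec_expand_rule rule (expand_rule rule)

-- ===== LEMMAS AND PROOFS =====

def prodN (rule : List (List Int)) : Nat :=
  match rule with
  | [] => 1
  | xs :: rest => xs.length * prodN rest

theorem foldl_append_eq (l : List (List Int)) (acc : List (List Int)) :
    l.foldl (fun acc i => acc ++ [i]) acc = acc ++ l := by
  induction l generalizing acc with
  | nil => simp
  | cons x xs ih => simp [List.foldl, ih]

theorem foldl_mul_sizes (rule : List (List Int)) (a : Nat) :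
    (rule.map List.length).foldl (· * ·) a = a * prodN rule := by
  induction rule generalizing a with
  | nil => simp [prodN]
  | cons xs rest ih => simp [prodN, ih, Nat.mul_assoc]

theorem length_pvProduct (rule : List (List Int)) :
    (pvProduct rule).length = prodN rule := by
  induction rule with
  | nil => simp [pvProduct, prodN]
  | cons xs rest ih =>
    simp [pvProduct, prodN, List.length_flatMap, ih, List.map_const']

theorem getD_flatMap (xs : List Int) (ps : List (List Int)) (k : Nat)
    (hk : k < xs.length * ps.length) :
    (xs.flatMap (fun x => ps.map (fun t => x :: t))).getD k [] =
      xs.getD (k / ps.length) 0 :: ps.getD (k % ps.length) [] := by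
  induction xs generalizing k with
  | nil => simp at hk
  | cons x xt ih =>
    have hps : 0 < ps.length := by
      rcases Nat.eq_zero_or_pos ps.length with h | h
      · simp [h] at hk
      · exact h
    by_cases hlt : k < ps.length
    · have h0 : k / ps.length = 0 := Nat.div_eq_of_lt hlt
      have hm : k % ps.length = k := Nat.mod_eq_of_lt hlt
      simp [List.flatMap_cons, List.getD_eq_getElem?_getD, List.getElem?_append_left, hlt, h0, hm]
    · rw [Nat.not_lt] at hlt
      simp only [List.length_cons] at hk
      rw [Nat.succ_mul] at hk
      have hk' : k - ps.length < xt.length * ps.length := by omega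
      have hrec := ih (k - ps.length) hk'
      have hdiv : k / ps.length = (k - ps.length) / ps.length + 1 := by
        rw [Nat.div_eq_sub_div hps hlt]
      have hmod : k % ps.length = (k - ps.length) % ps.length :=
        Nat.mod_eq_sub_mod hlt
      rw [List.flatMap_cons, List.getD_append_right]
      · simpa [hdiv, hmod, List.length_map] using hrec
      · simpa using hlt

theorem decode_eq (rule : List (List Int)) (i : Nat) (h : 0 < prodN rule) :
    pvDecode rule i = (i / prodN rule, (pvProduct rule).getD (i % prodN rule) []) := by
  induction rule generalizing i with
  | nil => simp [pvDecode, pvProduct, prodN, Nat.mod_one]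
  | cons xs rest ih =>
    have hx : 0 < xs.length := by
      rcases Nat.eq_zero_or_pos xs.length with h0 | h0
      · simp [prodN, h0] at h
      · exact h0
    have hr : 0 < prodN rest := by
      rcases Nat.eq_zero_or_pos (prodN rest) with h0 | h0
      · simp [prodN, h0] at h
      · exact h0
    have hrec := ih i hr
    simp only [pvDecode, hrec]
    rw [Prod.mk.injEq]
    constructor
    · show i / prodN rest / xs.length = i / prodN (xs :: rest)
      rw [Nat.div_div_eq_div_mul, prodN, Nat.mul_comm]
    · show xs.getD (i / prodN rest % xs.length) 0 :: (pvProduct rest).getD (i % prodN rest) [] =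
        (pvProduct (xs :: rest)).getD (i % prodN (xs :: rest)) []
      have hk : i % prodN (xs :: rest) < xs.length * (pvProduct rest).length := by
        rw [length_pvProduct]
        exact Nat.mod_lt _ (by simpa [prodN] using Nat.mul_pos hx hr)
      rw [show pvProduct (xs :: rest) = xs.flatMap (fun x => (pvProduct rest).map (fun t => x :: t)) from rfl,
        getD_flatMap _ _ _ hk, length_pvProduct]
      have h1 : i % prodN (xs :: rest) / prodN rest = i / prodN rest % xs.length := by
        rw [show prodN (xs :: rest) = prodN rest * xs.length from by
          simp [prodN, Nat.mul_comm]]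
        exact Nat.mod_mul_right_div_self i (prodN rest) xs.length
      have h2 : i % prodN (xs :: rest) % prodN rest = i % prodN rest := by
        apply Nat.mod_mod_of_dvd
        exact ⟨xs.length, by simp [prodN, Nat.mul_comm]⟩
      rw [h1, h2]

theorem alt_eq_product (rule : List (List Int)) :
    expand_rule_alt rule = pvProduct rule := by
  unfold expand_rule_alt
  simp only [foldl_mul_sizes, Nat.one_mul]
  rcases Nat.eq_zero_or_pos (prodN rule) with h0 | h0
  · have : (pvProduct rule).length = 0 := by rw [length_pvProduct, h0]
    simp [h0, List.eq_nil_of_length_eq_zero this]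
  · apply List.ext_getElem
    · simp [length_pvProduct]
    · intro n h1 h2
      have hn : n < prodN rule := by simpa using h1
      simp only [List.getElem_map, List.getElem_range]
      rw [decode_eq rule n h0]
      have : n % prodN rule = n := Nat.mod_eq_of_lt hn
      rw [this, List.getD_eq_getElem]

-- ===== VERDICT (by name: the statement is the Claim_ definition above) =====
theorem expand_rule_spec : Claim_equal_expand_rule := by
  intro rule _
  unfold Spec_expand_rule expand_rule
  rw [foldl_append_eq, alt_eq_product]
  simp
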